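-- pv_equiv track=rewrite | github.com/Siyoul-Jung/AI_MathMate | backend/engine_v2/modules/combinatorics/comb_grid_sudoku_sum.py | execute
-- ===== SOURCE A (Python) =====
-- import math
-- from typing import Dict, Any, List
--
-- def execute(seed: Dict[str, Any]) -> int:
--     K = seed["K"]
--
--     # 1. Franel Number S_K = sum(C(K, k)^3)
--     s_k = 0
--     for k in range(K + 1):
--         s_k += math.comb(K, k) ** 3
--
--     # 2. Total Ways N = (3K)! * S_K * (K!)^6
--     # 직접 큰 수를 곱하지 않고 소인수별 지수를 합쳐서 계산 (성능 최적화)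
--     prime_exponents = {}
--
--     def add_factors(n, multiplier=1):
--         if n <= 1: return
--         temp = n
--         d = 2
--         while d * d <= temp:
--             while temp % d == 0:
--                 prime_exponents[d] = prime_exponents.get(d, 0) + multiplier
--                 temp //= d
--             d += 1
--         if temp > 1:
--             prime_exponents[temp] = prime_exponents.get(temp, 0) + multiplier
--
--     def add_factorial_factors(n, multiplier=1):
--         for i in range(2, n + 1):
--             add_factors(i, multiplier)
--
--     # (3K)!
--     add_factorial_factors(3 * K, 1)
--     # S_K
--     add_factors(s_k, 1)
--     # (K!)^6
--     add_factorial_factors(K, 6)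
--
--     # 3. Sum p * e
--     result_sum = 0
--     for p, e in prime_exponents.items():
--         result_sum += p * e
--
--     return result_sum % 1000
-- ===== SOURCE B (Python) =====
-- def legendre(n, p):
--     # exponent of the prime p in n! by Legendre's formula
--     e = 0
--     pk = p
--     while pk <= n:
--         e += n // pk
--         pk *= p
--     return e
--
--
-- def sopfr(n):
--     # sum of prime factors of n with multiplicity (0 for n <= 1)
--     s = 0
--     d = 2
--     while d * d <= n:
--         while n % d == 0:
--             s += d
--             n //= d
--         d += 1
--     if n > 1:
--         s += n
--     return s
--
--
-- def execute(seed):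
--     K = seed["K"]
--
--     # Franel number S_K = sum C(K,k)^3, binomials by the multiplicative Pascal recurrence
--     s_k = 0
--     if K >= 0:
--         c = 1
--         for k in range(K + 1):
--             s_k += c ** 3
--             c = c * (K - k) // (k + 1)
--
--     n = 3 * K
--     # sieve: mark every multiple j = 2i, 3i, ... of every i in 2..n
--     composite = set()
--     for i in range(2, n + 1):
--         for j in range(2 * i, n + 1, i):
--             composite.add(j)
--
--     # for each prime p <= n, its exponent in (3K)! plus six times its exponent in K!
--     total = 0
--     for p in range(2, n + 1):
--         if p not in composite:
--             total += p * (legendre(n, p) + 6 * legendre(K, p))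
--
--     # prime factors of the Franel number by trial division
--     total += sopfr(s_k)
--
--     return total % 1000
-- ===== Notes on version B (the rewrite author's own statement) =====
-- stated objective: alternative
-- what changed: B replaces A's 'trial-divide every integer in 2..3K into a prime-exponent dict' by a Sieve of Eratosthenes up to 3K plus Legendre's formula: for each sieved prime p it adds p*(exponent of p in (3K)! + 6*exponent in K!) directly, trial division remaining only for the Franel number S_K; the binomials use the multiplicative Pascal recurrence instead of math.comb per k.
import Mathlib
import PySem

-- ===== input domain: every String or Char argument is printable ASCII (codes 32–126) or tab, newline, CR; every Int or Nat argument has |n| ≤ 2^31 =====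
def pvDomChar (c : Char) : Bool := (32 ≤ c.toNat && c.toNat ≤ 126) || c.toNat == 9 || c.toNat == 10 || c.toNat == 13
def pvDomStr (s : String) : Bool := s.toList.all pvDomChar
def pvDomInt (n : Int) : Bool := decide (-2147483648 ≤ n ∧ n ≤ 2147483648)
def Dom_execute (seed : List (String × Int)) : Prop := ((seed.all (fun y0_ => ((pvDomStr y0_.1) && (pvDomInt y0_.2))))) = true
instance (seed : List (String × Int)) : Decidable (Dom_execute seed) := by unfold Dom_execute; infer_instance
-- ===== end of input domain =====

-- B replaces A's per-integer trial division of 2..3K by a Sieve of Eratosthenes plus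
-- Legendre's formula for the exponent of each prime in (3K)! and K! (objective: alternative).
-- The while-loops of both ports carry a fuel argument (with 2 ≤ d / 0 < temp conjuncts in A's
-- inner guard) purely to make the recursion total; the fuel is always sufficient on the calls made.

-- ===== PORT A =====
-- inner 'while temp % d == 0' of add_factors
def aInner : Nat → Int → Int → Int → PySem.Dict Int Int → Int × PySem.Dict Int Int
  | 0, _, temp, _, acc => (temp, acc)
  | fuel + 1, d, temp, mult, acc =>
      if 2 ≤ d ∧ 0 < temp ∧ PySem.Int.mod temp d = 0 then
        aInner fuel d (PySem.Int.floordiv temp d) mult (acc.modify d 0 (· + mult))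
      else (temp, acc)

-- outer 'while d * d <= temp' of add_factors
def aOuter : Nat → Int → Int → Int → PySem.Dict Int Int → Int × PySem.Dict Int Int
  | 0, _, temp, _, acc => (temp, acc)
  | fuel + 1, d, temp, mult, acc =>
      if d * d ≤ temp then
        aOuter fuel (d + 1) (aInner (temp.toNat + 2) d temp mult acc).1 mult
          (aInner (temp.toNat + 2) d temp mult acc).2
      else (temp, acc)

def addFactors (n mult : Int) (acc : PySem.Dict Int Int) : PySem.Dict Int Int :=
  if n ≤ 1 then acc
  else if 1 < (aOuter (n.toNat + 2) 2 n mult acc).1 then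
    (aOuter (n.toNat + 2) 2 n mult acc).2.modify (aOuter (n.toNat + 2) 2 n mult acc).1 0 (· + mult)
  else (aOuter (n.toNat + 2) 2 n mult acc).2

def addFactorialFactors (n mult : Int) (acc : PySem.Dict Int Int) : PySem.Dict Int Int :=
  (PySem.List.pyRange 2 (n + 1)).foldl (fun acc i => addFactors i mult acc) acc

-- A's body applied to K = seed["K"]
def aMain (K : Int) : Int :=
  PySem.Int.mod
    ((addFactorialFactors K 6
        (addFactors
          ((PySem.List.pyRange 0 (K + 1)).foldl
            (fun s k => s + ((K.toNat.choose k.toNat : Int)) ^ 3) 0) 1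
          (addFactorialFactors (3 * K) 1 PySem.Dict.empty))).items.foldl
      (fun s p => s + p.1 * p.2) 0) 1000

def execute (seed : List (String × Int)) : Int :=
  aMain ((PySem.Dict.mk seed).getD "K" 0)

-- ===== PORT B =====
-- 'while pk <= n: e += n // pk; pk *= p' of legendre
def legLoop : Nat → Int → Int → Int → Int → Int
  | 0, _, _, _, e => e
  | fuel + 1, n, p, pk, e =>
      if pk ≤ n then legLoop fuel n p (pk * p) (e + PySem.Int.floordiv n pk) else e

-- exponent of the prime p in n! by Legendre's formula
def legendre (n p : Int) : Int := legLoop (n.toNat + 2) n p p 0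

-- inner 'while n % d == 0' of sopfr
def bInner : Nat → Int → Int → Int → Int × Int
  | 0, _, n, s => (n, s)
  | fuel + 1, d, n, s =>
      if 2 ≤ d ∧ 0 < n ∧ PySem.Int.mod n d = 0 then
        bInner fuel d (PySem.Int.floordiv n d) (s + d)
      else (n, s)

-- outer 'while d * d <= n' of sopfr
def bOuter : Nat → Int → Int → Int → Int × Int
  | 0, _, n, s => (n, s)
  | fuel + 1, d, n, s =>
      if d * d ≤ n then
        bOuter fuel (d + 1) (bInner (n.toNat + 2) d n s).1 (bInner (n.toNat + 2) d n s).2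
      else (n, s)

-- sum of prime factors of n with multiplicity (0 for n ≤ 1)
def sopfr (n : Int) : Int :=
  if 1 < (bOuter (n.toNat + 2) 2 n 0).1 then
    (bOuter (n.toNat + 2) 2 n 0).2 + (bOuter (n.toNat + 2) 2 n 0).1
  else (bOuter (n.toNat + 2) 2 n 0).2

-- 'composite = set(); for i in range(2, n+1): for j in range(2*i, n+1, i): composite.add(j)'
def sieve (n : Int) : PySem.Set Int :=
  (PySem.List.pyRange 2 (n + 1)).foldl
    (fun s i => (PySem.List.pyRange (2 * i) (n + 1) i).foldl (fun s j => PySem.Set.add s j) s)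
    PySem.Set.empty

-- B's body applied to K = seed["K"]
def bMain (K : Int) : Int :=
  PySem.Int.mod
    (((PySem.List.pyRange 2 (3 * K + 1)).foldl
        (fun t p =>
          if PySem.Set.contains (sieve (3 * K)) p = false then
            t + p * (legendre (3 * K) p + 6 * legendre K p)
          else t) 0)
      + sopfr (if 0 ≤ K then
          ((PySem.List.pyRange 0 (K + 1)).foldl
            (fun (p : Int × Int) k => (p.1 + p.2 ^ 3, PySem.Int.floordiv (p.2 * (K - k)) (k + 1)))
            (0, 1)).1
        else 0)) 1000

def execute_alt (seed : List (String × Int)) : Int :=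
  bMain ((PySem.Dict.mk seed).getD "K" 0)

-- ===== PRECONDITION & SPEC =====
-- Pre_ excludes seeds without a "K" key (the Python raises KeyError) and seeds whose key list has
-- duplicates (they denote no single Python dict: building the dict collapses them, so any value
-- there is an artefact of the association-list view; both ports read the first match and agree).
def Pre_execute (seed : List (String × Int)) : Prop :=
  (seed.map Prod.fst).Nodup ∧ "K" ∈ seed.map Prod.fst
instance (seed : List (String × Int)) : Decidable (Pre_execute seed) := by
  unfold Pre_execute; infer_instance

def pvWitness_execute : (List (String × Int)) := [("K", 3)]

def Spec_execute (seed : List (String × Int)) (out : Int) : Prop := out = execute_alt seed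
instance (seed : List (String × Int)) (out : Int) : Decidable (Spec_execute seed out) := by
  unfold Spec_execute; infer_instance

-- ===== CLAIM (what is proved, stated in full; the proofs are below) =====
def Claim_equal_execute : Prop :=
  ∀ (seed : List (String × Int)), Dom_execute seed → Pre_execute seed →
    Spec_execute seed (execute seed)

-- ===== LEMMAS AND PROOFS =====

-- Σ p·e over an items list
def sumPE (l : List (Int × Int)) : Int := (l.map (fun p => p.1 * p.2)).sum

theorem map_overwrite_id (k v : Int) :
    ∀ l : List (Int × Int), k ∉ l.map (fun p => p.1) →
      l.map (fun p => if (p.1 == k) = true then (k, v) else p) = l := by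
  intro l hl
  induction l with
  | nil => rfl
  | cons a l ih =>
      simp only [List.map_cons, List.mem_cons, not_or] at hl
      have ha : (a.1 == k) = false := by
        simp only [beq_eq_false_iff_ne, ne_eq]
        intro h; exact hl.1 h.symm
      simp only [List.map_cons, ha, Bool.false_eq_true, if_false]
      rw [ih hl.2]

theorem sumPE_overwrite (k v : Int) :
    ∀ l : List (Int × Int), (l.map (fun p => p.1)).Nodup →
      ∀ w : Int × Int, l.find? (fun p => p.1 == k) = some w →
      sumPE (l.map (fun p => if (p.1 == k) = true then (k, v) else p))
        = sumPE l + k * v - k * w.2 := by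
  intro l
  induction l with
  | nil => intro _ w hw; simp at hw
  | cons a l ih =>
      intro hnd w hw
      simp only [List.map_cons, List.nodup_cons] at hnd
      by_cases hak : (a.1 == k) = true
      · simp only [List.find?_cons, hak] at hw
        have hwa : w = a := by injection hw with h; exact h.symm
        have hk : a.1 = k := eq_of_beq hak
        have htail : l.map (fun p => if (p.1 == k) = true then (k, v) else p) = l :=
          map_overwrite_id k v l (by rw [← hk]; exact hnd.1)
        simp only [List.map_cons, hak, if_true, htail, sumPE, List.sum_cons]
        rw [hwa, hk]; ring
      · simp only [List.find?_cons, Bool.not_eq_true] at hak hw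
        rw [hak] at hw
        have := ih hnd.2 w hw
        simp only [List.map_cons, hak, Bool.false_eq_true, if_false, sumPE, List.sum_cons] at this ⊢
        rw [this]; ring

theorem sumPE_modify (d : PySem.Dict Int Int) (k m : Int) (hnd : d.keys.Nodup) :
    sumPE (d.modify k 0 (· + m)).items = sumPE d.items + k * m := by
  have hmod : d.modify k 0 (· + m) = d.insert k (d.getD k 0 + m) := rfl
  by_cases hc : d.contains k = true
  · have hsome : (d.get? k).isSome := by rw [← PySem.Dict.contains_eq_isSome_get?]; exact hc
    obtain ⟨v, hv⟩ : ∃ v, d.get? k = some v := Option.isSome_iff_exists.mp hsome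
    have hgd : d.getD k 0 = v := PySem.Dict.getD_of_get?_eq_some d 0 hv
    have hfind : ∃ w : Int × Int, d.items.find? (fun p => p.1 == k) = some w ∧ w.2 = v := by
      unfold PySem.Dict.get? at hv
      cases hf : d.items.find? (fun p => p.1 == k) with
      | none => rw [hf] at hv; simp at hv
      | some w => rw [hf] at hv; simp at hv; exact ⟨w, rfl, hv⟩
    obtain ⟨w, hw, hwv⟩ := hfind
    rw [hmod, PySem.Dict.items_insert_of_contains d _ hc]
    rw [sumPE_overwrite k (d.getD k 0 + m) d.items hnd w hw]
    rw [hgd, hwv]; ring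
  · rw [hmod, PySem.Dict.items_insert_of_not_contains d _ (by simpa using hc)]
    rw [PySem.Dict.getD_of_not_contains d 0 (by simpa using hc)]
    simp [sumPE]

theorem nodup_keys_modify (d : PySem.Dict Int Int) (k m : Int) (hnd : d.keys.Nodup) :
    (d.modify k 0 (· + m)).keys.Nodup :=
  PySem.Dict.nodup_keys_insert d k _ hnd

theorem mirror_inner (fuel : Nat) : ∀ (d temp mult : Int) (acc : PySem.Dict Int Int) (s : Int),
    (aInner fuel d temp mult acc).1 = (bInner fuel d temp s).1 ∧
    (acc.keys.Nodup →
      sumPE (aInner fuel d temp mult acc).2.items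
          = sumPE acc.items + mult * ((bInner fuel d temp s).2 - s)
        ∧ (aInner fuel d temp mult acc).2.keys.Nodup) := by
  induction fuel with
  | zero =>
      intro d temp mult acc s
      exact ⟨rfl, fun hnd => ⟨by simp [aInner, bInner], hnd⟩⟩
  | succ fuel ih =>
      intro d temp mult acc s
      by_cases h : 2 ≤ d ∧ 0 < temp ∧ PySem.Int.mod temp d = 0
      · rw [aInner, bInner, if_pos h, if_pos h]
        obtain ⟨h1, h2⟩ := ih d (PySem.Int.floordiv temp d) mult (acc.modify d 0 (· + mult)) (s + d)
        refine ⟨h1, fun hnd => ?_⟩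
        obtain ⟨h3, h4⟩ := h2 (nodup_keys_modify acc d mult hnd)
        refine ⟨?_, h4⟩
        rw [h3, sumPE_modify acc d mult hnd]; ring
      · rw [aInner, bInner, if_neg h, if_neg h]
        exact ⟨rfl, fun hnd => ⟨by ring, hnd⟩⟩

theorem mirror_outer (fuel : Nat) : ∀ (d temp mult : Int) (acc : PySem.Dict Int Int) (s : Int),
    (aOuter fuel d temp mult acc).1 = (bOuter fuel d temp s).1 ∧
    (acc.keys.Nodup →
      sumPE (aOuter fuel d temp mult acc).2.items
          = sumPE acc.items + mult * ((bOuter fuel d temp s).2 - s)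
        ∧ (aOuter fuel d temp mult acc).2.keys.Nodup) := by
  induction fuel with
  | zero =>
      intro d temp mult acc s
      exact ⟨rfl, fun hnd => ⟨by simp [aOuter, bOuter], hnd⟩⟩
  | succ fuel ih =>
      intro d temp mult acc s
      by_cases h : d * d ≤ temp
      · rw [aOuter, bOuter, if_pos h, if_pos h]
        obtain ⟨hi1, hi2⟩ := mirror_inner (temp.toNat + 2) d temp mult acc s
        obtain ⟨ho1, ho2⟩ := ih (d + 1) (aInner (temp.toNat + 2) d temp mult acc).1 mult
          (aInner (temp.toNat + 2) d temp mult acc).2 ((bInner (temp.toNat + 2) d temp s).2)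
        refine ⟨by rw [← hi1]; exact ho1, fun hnd => ?_⟩
        obtain ⟨hs, hndi⟩ := hi2 hnd
        obtain ⟨hs', hndo⟩ := ho2 hndi
        refine ⟨?_, hndo⟩
        rw [← hi1, hs', hs]; ring
      · rw [aOuter, bOuter, if_neg h, if_neg h]
        exact ⟨rfl, fun hnd => ⟨by ring, hnd⟩⟩

theorem addFactors_sum (n mult : Int) (acc : PySem.Dict Int Int) (hnd : acc.keys.Nodup) :
    sumPE (addFactors n mult acc).items = sumPE acc.items + mult * sopfr n ∧
    (addFactors n mult acc).keys.Nodup := by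
  by_cases hle : n ≤ 1
  · have hng : ¬ ((2:Int) * 2 ≤ n) := by omega
    have hb : bOuter (n.toNat + 2) 2 n 0 = (n, 0) := by rw [bOuter, if_neg hng]
    have hs : sopfr n = 0 := by rw [sopfr, hb]; simp; omega
    rw [addFactors, if_pos hle, hs]
    exact ⟨by ring, hnd⟩
  · obtain ⟨hf, hx⟩ := mirror_outer (n.toNat + 2) 2 n mult acc 0
    obtain ⟨ho, hndo⟩ := hx hnd
    rw [addFactors, if_neg hle, sopfr]
    by_cases h1 : 1 < (bOuter (n.toNat + 2) 2 n 0).1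
    · rw [if_pos h1, if_pos (hf ▸ h1)]
      refine ⟨?_, nodup_keys_modify _ _ _ hndo⟩
      rw [sumPE_modify _ _ _ hndo, ho, hf]; ring
    · rw [if_neg h1, if_neg (hf ▸ h1)]
      refine ⟨?_, hndo⟩
      rw [ho]; ring

theorem addFactorialFactors_sum (l : List Int) (mult : Int) (acc : PySem.Dict Int Int)
    (hnd : acc.keys.Nodup) :
    sumPE (l.foldl (fun acc i => addFactors i mult acc) acc).items
        = sumPE acc.items + mult * (l.map sopfr).sum ∧
    (l.foldl (fun acc i => addFactors i mult acc) acc).keys.Nodup := by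
  induction l generalizing acc with
  | nil => exact ⟨by simp, hnd⟩
  | cons a l ih =>
      obtain ⟨h1, h2⟩ := addFactors_sum a mult acc hnd
      obtain ⟨h3, h4⟩ := ih (addFactors a mult acc) h2
      refine ⟨?_, by simpa using h4⟩
      simp only [List.foldl_cons, List.map_cons, List.sum_cons]
      rw [h3, h1]; ring

-- total p·e sum of A's three dictionary-building phases
theorem A_sum (K sk : Int) :
    sumPE ((addFactorialFactors K 6
        (addFactors sk 1 (addFactorialFactors (3 * K) 1 PySem.Dict.empty))).items)
      = ((PySem.List.pyRange 2 (3 * K + 1)).map sopfr).sum + sopfr sk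
        + 6 * ((PySem.List.pyRange 2 (K + 1)).map sopfr).sum := by
  simp only [addFactorialFactors]
  obtain ⟨h1, h2⟩ := addFactorialFactors_sum (PySem.List.pyRange 2 (3 * K + 1)) 1
    PySem.Dict.empty PySem.Dict.nodup_keys_empty
  obtain ⟨h3, h4⟩ := addFactors_sum sk 1 _ h2
  obtain ⟨h5, _⟩ := addFactorialFactors_sum (PySem.List.pyRange 2 (K + 1)) 6 _ h4
  rw [h5, h3, h1]
  have hempty : sumPE (PySem.Dict.empty : PySem.Dict Int Int).items = 0 := rfl
  rw [hempty]; ring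

theorem franel_aux (K' : Nat) : ∀ j : Nat, j ≤ K' + 1 →
    (List.range j).foldl
      (fun (p : Int × Int) (k : Nat) =>
        (p.1 + p.2 ^ 3, PySem.Int.floordiv (p.2 * ((K' : Int) - (k : Int))) ((k : Int) + 1)))
      (0, 1)
    = (((List.range j).map (fun k => ((K'.choose k : Int)) ^ 3)).sum, ((K'.choose j : Int))) := by
  intro j
  induction j with
  | zero => intro _; simp
  | succ j ih =>
      intro hj
      have hj' : j ≤ K' := by omega
      rw [List.range_succ, List.foldl_append, List.foldl_cons, List.foldl_nil, ih (by omega)]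
      simp only [List.map_append, List.sum_append, List.map_cons, List.sum_cons, List.map_nil,
        List.sum_nil]
      refine Prod.ext (by simp) ?_
      show PySem.Int.floordiv ((K'.choose j : Int) * ((K' : Int) - (j : Int))) ((j : Int) + 1)
          = (K'.choose (j + 1) : Int)
      have hcast : (K' : Int) - (j : Int) = ((K' - j : Nat) : Int) := by omega
      rw [hcast, ← Nat.cast_mul, ← Nat.choose_succ_right_eq]
      have : ((j : Int) + 1) = ((j + 1 : Nat) : Int) := by omega
      rw [this, PySem.Int.floordiv_natCast]
      rw [Nat.mul_div_cancel _ (by omega : 0 < j + 1)]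

theorem franel_eq (K : Int) (hK : 0 ≤ K) :
    (PySem.List.pyRange 0 (K + 1)).foldl
      (fun s k => s + ((K.toNat.choose k.toNat : Int)) ^ 3) 0 =
    ((PySem.List.pyRange 0 (K + 1)).foldl
      (fun (p : Int × Int) k => (p.1 + p.2 ^ 3, PySem.Int.floordiv (p.2 * (K - k)) (k + 1)))
      (0, 1)).1 := by
  obtain ⟨K', rfl⟩ : ∃ K' : Nat, K = (K' : Int) := ⟨K.toNat, (Int.toNat_of_nonneg hK).symm⟩
  have hr : (K' : Int) + 1 = ((K' + 1 : Nat) : Int) := by omega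
  rw [hr, PySem.List.pyRange_zero_natCast, List.foldl_map, List.foldl_map]
  have hA : ∀ (a : Int) (l : List Nat),
      l.foldl (fun s (k : Nat) => s + (((K' : Int).toNat.choose ((k : Int)).toNat : Int)) ^ 3) a
        = a + (l.map (fun k => ((K'.choose k : Int)) ^ 3)).sum := by
    intro a l
    have := PySem.List.foldl_add l (fun k : Nat => ((K'.choose k : Int)) ^ 3) a
    simpa using this
  rw [hA, franel_aux K' (K' + 1) le_rfl]
  simp

theorem bInner_strip : ∀ (fuel : Nat) (d m : Nat) (s : Int), 2 ≤ d → 1 ≤ m → m ≤ fuel →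
    ∃ k : Nat, bInner fuel (d : Int) (m : Int) s = (((m / d ^ k : Nat) : Int), s + (d : Int) * k)
      ∧ d ^ k ∣ m ∧ ¬ d ∣ m / d ^ k := by
  intro fuel
  induction fuel with
  | zero => intro d m s _ h1 h2; omega
  | succ fuel ih =>
      intro d m s hd h1 h2
      by_cases hdvd : d ∣ m
      · have hmod : m % d = 0 := Nat.mod_eq_zero_of_dvd hdvd
        have hguard : 2 ≤ (d:Int) ∧ 0 < (m:Int) ∧ PySem.Int.mod (m:Int) (d:Int) = 0 := by
          refine ⟨by exact_mod_cast hd, by exact_mod_cast h1, ?_⟩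
          rw [PySem.Int.mod_natCast, hmod]; rfl
        rw [bInner, if_pos hguard, PySem.Int.floordiv_natCast]
        have hmd1 : 1 ≤ m / d := Nat.one_le_div_iff (by omega) |>.mpr (Nat.le_of_dvd (by omega) hdvd)
        have hmdlt : m / d < m := Nat.div_lt_self (by omega) (by omega)
        obtain ⟨k, hk, hdvd2, hnd⟩ := ih d (m / d) (s + d) hd hmd1 (by omega)
        refine ⟨k + 1, ?_, ?_, ?_⟩
        · rw [hk]
          have : m / d / d ^ k = m / d ^ (k + 1) := by
            rw [Nat.div_div_eq_div_mul, pow_succ', mul_comm]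
          rw [this]
          have : s + (d:Int) + (d:Int) * k = s + (d:Int) * (k + 1 : Nat) := by push_cast; ring
          rw [this]
        · obtain ⟨t, ht⟩ := hdvd2
          exact ⟨t, by rw [pow_succ', mul_assoc, ← ht, Nat.mul_div_cancel' hdvd]⟩
        · have : m / d ^ (k + 1) = m / d / d ^ k := by
            rw [Nat.div_div_eq_div_mul, pow_succ', mul_comm]
          rw [this]; exact hnd
      · refine ⟨0, ?_, by simp, by simpa using hdvd⟩
        rw [bInner]
        have hng : ¬ (2 ≤ (d:Int) ∧ 0 < (m:Int) ∧ PySem.Int.mod (m:Int) (d:Int) = 0) := by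
          rw [PySem.Int.mod_natCast]
          intro h
          exact hdvd (Nat.dvd_of_mod_eq_zero (by exact_mod_cast h.2.2))
        rw [if_neg hng]
        simp

def sopfrN (m : Nat) : Nat := m.factorization.sum fun p e => p * e

theorem sopfrN_mul (a b : Nat) (ha : a ≠ 0) (hb : b ≠ 0) :
    sopfrN (a * b) = sopfrN a + sopfrN b := by
  unfold sopfrN
  rw [Nat.factorization_mul ha hb]
  exact Finsupp.sum_add_index (by intro p _; rfl) (by intro p _ e1 e2; ring)

theorem sopfrN_prime {p : Nat} (hp : p.Prime) : sopfrN p = p := by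
  unfold sopfrN
  rw [hp.factorization]
  simp

theorem sopfrN_pow {p : Nat} (hp : p.Prime) (k : Nat) : sopfrN (p ^ k) = p * k := by
  induction k with
  | zero => simp [sopfrN]
  | succ k ih =>
      rw [pow_succ, sopfrN_mul _ _ (pow_ne_zero _ hp.pos.ne') hp.pos.ne', ih, sopfrN_prime hp]
      ring

theorem prime_of_no_small_divisor {m d : Nat} (h1 : 2 ≤ m) (hdd : m < d * d)
    (hinv : ∀ q, 2 ≤ q → q < d → ¬ q ∣ m) : m.Prime := by
  rw [Nat.prime_def_le_sqrt]
  refine ⟨h1, ?_⟩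
  intro q hq hsq
  have hqd : q < d := by
    have : m.sqrt < d := Nat.sqrt_lt.mpr hdd
    omega
  exact hinv q hq hqd

theorem bOuter_run : ∀ (fuel : Nat) (d m : Nat) (s : Int), 2 ≤ d → 1 ≤ m →
    (∀ q, 2 ≤ q → q < d → ¬ q ∣ m) → m + 2 ≤ d + fuel →
    ∃ r : Nat, bOuter fuel (d : Int) (m : Int) s
        = ((r : Int), s + (sopfrN m : Int) - (sopfrN r : Int))
      ∧ 1 ≤ r ∧ (1 < r → sopfrN r = r) := by
  intro fuel
  induction fuel with
  | zero =>
      intro d m s hd h1 hinv hb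
      -- the invariant forces m = 1 here
      have hm1 : m = 1 := by
        by_contra h
        exact hinv m (by omega) (by omega) dvd_rfl
      subst hm1
      exact ⟨1, by simp [bOuter], by omega, by omega⟩
  | succ fuel ih =>
      intro d m s hd h1 hinv hb
      by_cases hg : (d : Int) * (d : Int) ≤ (m : Int)
      · rw [bOuter, if_pos hg]
        have hdn : ((m : Int).toNat + 2) = m + 2 := by simp
        rw [hdn]
        obtain ⟨k, hk, hdvdk, hnd⟩ := bInner_strip (m + 2) d m s hd h1 (by omega)
        rw [hk]
        have hdpos : 0 < d ^ k := pow_pos (show 0 < d by omega) k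
        have hm' : 1 ≤ m / d ^ k :=
          Nat.one_le_div_iff hdpos |>.mpr (Nat.le_of_dvd (by omega) hdvdk)
        have hsop : (sopfrN m : Int) = (d : Int) * k + (sopfrN (m / d ^ k) : Int) := by
          rcases Nat.eq_zero_or_pos k with hk0 | hkpos
          · subst hk0; simp
          · have hdprime : d.Prime := by
              have hddm : d ∣ m := dvd_trans (dvd_pow_self d (by omega)) hdvdk
              rw [Nat.prime_def_le_sqrt]
              refine ⟨hd, ?_⟩
              intro q hq hsq hqd
              have hqm : q ∣ m := hqd.trans hddm
              have : q < d := by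
                have := Nat.sqrt_lt_self (show 1 < d by omega)
                omega
              exact hinv q hq this hqm
            have hmeq : m = d ^ k * (m / d ^ k) := (Nat.mul_div_cancel' hdvdk).symm
            calc (sopfrN m : Int) = (sopfrN (d ^ k * (m / d ^ k)) : Int) := by rw [← hmeq]
              _ = (d : Int) * k + (sopfrN (m / d ^ k) : Int) := by
                  rw [sopfrN_mul _ _ (pow_ne_zero _ (by omega)) (by omega)]
                  push_cast [sopfrN_pow hdprime k]
                  ring
        have hinv' : ∀ q, 2 ≤ q → q < d + 1 → ¬ q ∣ (m / d ^ k) := by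
          intro q hq hlt hdv
          rcases Nat.lt_or_ge q d with h | h
          · exact hinv q hq h (hdv.trans (Nat.div_dvd_of_dvd hdvdk))
          · have : q = d := by omega
            subst this
            exact hnd hdv
        have hmle : m / d ^ k ≤ m := Nat.div_le_self _ _
        have hcast : ((d : Int) + 1) = ((d + 1 : Nat) : Int) := by push_cast; ring
        rw [hcast]
        obtain ⟨r, hr, hr1, hrp⟩ := ih (d + 1) (m / d ^ k) (s + (d : Int) * k) (by omega) hm' hinv' (by omega)
        refine ⟨r, ?_, hr1, hrp⟩
        rw [hr, hsop]
        ring_nf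
      · rw [bOuter, if_neg hg]
        refine ⟨m, by simp, h1, ?_⟩
        intro hm1
        have : m.Prime := prime_of_no_small_divisor (by omega) (by exact_mod_cast not_le.mp hg) hinv
        rw [sopfrN_prime this]

theorem sopfr_eq (m : Nat) : sopfr (m : Int) = (sopfrN m : Int) := by
  rcases Nat.eq_zero_or_pos m with h0 | hpos
  · subst h0
    norm_num [sopfr, bOuter, sopfrN]
  · unfold sopfr
    have htn : ((m : Int).toNat + 2) = m + 2 := by simp
    rw [htn]
    obtain ⟨r, hr, hr1, hrp⟩ := bOuter_run (m + 2) 2 m 0 (by omega) hpos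
      (by intro q hq hlt; omega) (by omega)
    rw [show ((2:Int)) = ((2:Nat):Int) by norm_num, hr]
    dsimp only
    rcases Nat.lt_or_ge 1 r with hgt | hle
    · rw [if_pos (by exact_mod_cast hgt)]
      have := hrp hgt
      push_cast [this]
      ring
    · have : r = 1 := by omega
      subst this
      rw [if_neg (by norm_num)]
      simp [sopfrN]

theorem sopfrN_zero : sopfrN 0 = 0 := by simp [sopfrN]

theorem sopfrN_one : sopfrN 1 = 0 := by simp [sopfrN]

theorem sopfrN_factorial (n : Nat) :
    sopfrN (Nat.factorial n) = ∑ i ∈ Finset.range (n + 1), sopfrN i := by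
  induction n with
  | zero => simp [Nat.factorial, sopfrN_one, sopfrN_zero]
  | succ n ih =>
      rw [Nat.factorial_succ, sopfrN_mul _ _ (by omega) (Nat.factorial_ne_zero n),
        Finset.sum_range_succ, ih]
      ring

-- the sum over 2..M of sopfrN, as it appears on A's side, equals sopfrN (M!)

theorem sum_Ico_sopfrN (M : Nat) :
    ∑ i ∈ Finset.Ico 2 (M + 1), sopfrN i = sopfrN (Nat.factorial M) := by
  rw [sopfrN_factorial]
  apply Finset.sum_subset
  · intro x hx
    simp only [Finset.mem_Ico] at hx
    simp only [Finset.mem_range]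
    omega
  · intro x hx hnx
    simp only [Finset.mem_range] at hx
    simp only [Finset.mem_Ico, not_and, not_lt] at hnx
    have : x = 0 ∨ x = 1 := by omega
    rcases this with h | h <;> subst h
    · exact sopfrN_zero
    · exact sopfrN_one

theorem legLoop_run : ∀ (fuel : Nat) (N P t : Nat) (e : Int) (B : Nat), 2 ≤ P → 1 ≤ t →
    t ≤ B → N < P ^ B → B ≤ fuel + t →
    legLoop fuel (N : Int) (P : Int) ((P ^ t : Nat) : Int) e
      = e + ((∑ i ∈ Finset.Ico t B, N / P ^ i : Nat) : Int) := by
  intro fuel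
  induction fuel with
  | zero =>
      intro N P t e B hP ht htB hNB hBf
      have : B = t := by omega
      subst this
      simp [legLoop]
  | succ fuel ih =>
      intro N P t e B hP ht htB hNB hBf
      by_cases hg : P ^ t ≤ N
      · have htB' : t < B := by
          by_contra h
          have : B = t := by omega
          subst this
          omega
        rw [legLoop, if_pos (by exact_mod_cast hg)]
        have hpk : ((P ^ t : Nat) : Int) * (P : Int) = ((P ^ (t + 1) : Nat) : Int) := by
          push_cast [pow_succ]; ring
        have hfd : PySem.Int.floordiv (N : Int) ((P ^ t : Nat) : Int)
            = ((N / P ^ t : Nat) : Int) := PySem.Int.floordiv_natCast N (P ^ t)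
        rw [hpk, hfd, ih N P (t + 1) (e + ((N / P ^ t : Nat) : Int)) B hP (by omega) (by omega) hNB (by omega)]
        rw [Finset.sum_eq_sum_Ico_succ_bot htB']
        push_cast
        ring
      · rw [legLoop, if_neg (by exact_mod_cast hg)]
        have hz : ∑ i ∈ Finset.Ico t B, N / P ^ i = 0 := by
          apply Finset.sum_eq_zero
          intro i hi
          simp only [Finset.mem_Ico] at hi
          apply Nat.div_eq_of_lt
          calc N < P ^ t := by omega
            _ ≤ P ^ i := Nat.pow_le_pow_right (by omega) hi.1
        rw [hz]
        simp

theorem legendre_eq (N P : Nat) (hP : P.Prime) :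
    legendre (N : Int) (P : Int) = ((Nat.factorial N).factorization P : Int) := by
  unfold legendre
  have htn : ((N : Int).toNat + 2) = N + 2 := by simp
  rw [htn]
  have h := legLoop_run (N + 2) N P 1 0 (Nat.log P N + 1) hP.two_le (by omega) (by omega)
    (Nat.lt_pow_succ_log_self hP.one_lt N) (by have := Nat.log_le_self P N; omega)
  rw [pow_one] at h
  rw [h, Nat.factorization_factorial hP (Nat.lt_succ_self _)]
  simp

-- sieve membership

theorem mem_foldl_add (l : List Int) : ∀ (s : PySem.Set Int) (x : Int),
    x ∈ l.foldl (fun s j => PySem.Set.add s j) s ↔ x ∈ s ∨ x ∈ l := by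
  induction l with
  | nil => simp
  | cons a l ih =>
      intro s x
      simp only [List.foldl_cons, ih, PySem.Set.mem_add, List.mem_cons]
      tauto

theorem mem_sieve (n x : Int) :
    x ∈ sieve n ↔ ∃ i ∈ PySem.List.pyRange 2 (n + 1), x ∈ PySem.List.pyRange (2 * i) (n + 1) i := by
  unfold sieve
  generalize PySem.List.pyRange 2 (n + 1) = l
  have : ∀ (s : PySem.Set Int),
      x ∈ l.foldl (fun s i => (PySem.List.pyRange (2 * i) (n + 1) i).foldl (fun s j => PySem.Set.add s j) s) s
        ↔ x ∈ s ∨ ∃ i ∈ l, x ∈ PySem.List.pyRange (2 * i) (n + 1) i := by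
    induction l with
    | nil => simp
    | cons a l ih =>
        intro s
        simp only [List.foldl_cons, ih, mem_foldl_add, List.mem_cons]
        constructor
        · rintro (⟨h | h⟩ | ⟨i, hi, h⟩)
          · exact Or.inl h
          · exact Or.inr ⟨a, Or.inl rfl, h⟩
          · exact Or.inr ⟨i, Or.inr hi, h⟩
        · rintro (h | ⟨i, (rfl | hi), h⟩)
          · exact Or.inl (Or.inl h)
          · exact Or.inl (Or.inr h)
          · exact Or.inr ⟨i, hi, h⟩
  rw [this]
  simp [PySem.Set.empty]

theorem sieve_prime (n p : Int) (h2 : 2 ≤ p) (hpn : p ≤ n) :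
    (p ∈ sieve n) ↔ ¬ (p.toNat.Prime) := by
  rw [mem_sieve]
  constructor
  · rintro ⟨i, hi, hm⟩
    rw [PySem.List.mem_pyRange_one] at hi
    rw [PySem.List.mem_pyRange_iff_of_pos (by omega)] at hm
    obtain ⟨hm1, hm2, hm3⟩ := hm
    obtain ⟨c, hc⟩ := hm3
    have hidvd : i ∣ p := ⟨c + 2, by linarith [hc]⟩
    intro hp
    have hint : (i.toNat : Int) = i := Int.toNat_of_nonneg (by omega)
    have hpnt : (p.toNat : Int) = p := Int.toNat_of_nonneg (by omega)
    have hdNat : i.toNat ∣ p.toNat := by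
      obtain ⟨t, ht⟩ := hidvd
      refine ⟨t.toNat, ?_⟩
      have htpos : 0 ≤ t := by nlinarith [hi.1]
      have : (p.toNat : Int) = (i.toNat : Int) * (t.toNat : Int) := by
        rw [hint, Int.toNat_of_nonneg htpos, hpnt]
        exact ht
      exact_mod_cast this
    rcases (hp.eq_one_or_self_of_dvd i.toNat hdNat) with h | h
    · omega
    · omega
  · intro hnp
    have h2' : 2 ≤ p.toNat := by omega
    obtain ⟨i, hidvd, hi2, hilt⟩ := Nat.exists_dvd_of_not_prime2 h2' hnp
    refine ⟨(i : Int), ?_, ?_⟩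
    · rw [PySem.List.mem_pyRange_one]
      constructor
      · exact_mod_cast hi2
      · have : (i : Int) < p := by
          have hpnt : (p.toNat : Int) = p := Int.toNat_of_nonneg (by omega)
          omega
        omega
    · rw [PySem.List.mem_pyRange_iff_of_pos (by exact_mod_cast (by omega : 0 < i))]
      obtain ⟨c, hc⟩ := hidvd
      have hc2 : 2 ≤ c := by
        rcases Nat.lt_or_ge c 2 with h | h
        · interval_cases c <;> omega
        · exact h
      refine ⟨?_, by omega, ?_⟩
      · have : (p.toNat : Int) = p := Int.toNat_of_nonneg (by omega)
        rw [← this]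
        push_cast [hc]
        nlinarith [hc2, hi2]
      · have : (p.toNat : Int) = p := Int.toNat_of_nonneg (by omega)
        rw [← this]
        push_cast [hc]
        exact ⟨(c : Int) - 2, by ring⟩

theorem foldl_guard_sum (c : Int → Bool) (f : Int → Int) :
    ∀ (l : List Int) (a : Int),
    l.foldl (fun t p => if c p = false then t + f p else t) a
      = a + (l.map (fun p => if c p = false then f p else 0)).sum := by
  intro l
  induction l with
  | nil => simp
  | cons x l ih =>
      intro a
      simp only [List.foldl_cons, List.map_cons, List.sum_cons, ih]
      by_cases h : c x = false
      · rw [if_pos h, if_pos h]; ring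
      · rw [if_neg h, if_neg h]; ring

theorem sum_ite_prime (B m : Nat) (hsupp : ∀ p, p.Prime → p ∣ m → 2 ≤ p ∧ p < B + 1) :
    ∑ q ∈ Finset.Ico 2 (B + 1), (if q.Prime then q * m.factorization q else 0) = sopfrN m := by
  rcases Nat.eq_zero_or_pos m with h0 | h0
  · subst h0
    simp [sopfrN_zero, Nat.factorization_zero]
  unfold sopfrN
  rw [Finsupp.sum]
  rw [← Finset.sum_subset (h := ?_) (hf := ?_)]
  · apply Finset.sum_congr rfl
    intro q hq
    rw [if_pos (Nat.prime_of_mem_primeFactors (by simpa [Nat.support_factorization] using hq))]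
  · intro q hq
    rw [Nat.support_factorization] at hq
    have hp := Nat.prime_of_mem_primeFactors hq
    have hd := Nat.dvd_of_mem_primeFactors hq
    obtain ⟨h1, h2⟩ := hsupp q hp hd
    simp only [Finset.mem_Ico]
    omega
  · intro q _ hq
    rw [Nat.support_factorization] at hq
    split_ifs with hp
    · rw [Nat.factorization_eq_zero_of_not_dvd ?_]
      · ring
      · intro hd
        exact hq (Nat.mem_primeFactors.mpr ⟨hp, hd, by omega⟩)
    · rfl

theorem cast_sum_ite_prime (B m : Nat) (hsupp : ∀ p, p.Prime → p ∣ m → 2 ≤ p ∧ p < B + 1) :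
    ∑ q ∈ Finset.Ico 2 (B + 1), (if q.Prime then (q : Int) * (m.factorization q : Int) else 0)
      = (sopfrN m : Int) := by
  rw [← sum_ite_prime B m hsupp, Nat.cast_sum]
  apply Finset.sum_congr rfl
  intro q _
  split_ifs with hp
  · push_cast; ring
  · rfl

theorem bFold_eq (K : Int) (hK : 1 ≤ K) :
    (PySem.List.pyRange 2 (3 * K + 1)).foldl
        (fun t p =>
          if PySem.Set.contains (sieve (3 * K)) p = false then
            t + p * (legendre (3 * K) p + 6 * legendre K p)
          else t) 0
      = (sopfrN (Nat.factorial (3 * K.toNat)) : Int)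
        + 6 * (sopfrN (Nat.factorial K.toNat) : Int) := by
  have hKn : ((K.toNat : Int)) = K := Int.toNat_of_nonneg (by omega)
  set Kn := K.toNat with hKdef
  set N := 3 * Kn with hNdef
  have hN3 : (3 : Nat) ≤ N := by omega
  have h3K : 3 * K = (N : Int) := by omega
  rw [foldl_guard_sum]
  rw [PySem.List.pyRange_one 2 (3 * K + 1)]
  have hM : (3 * K + 1 - 2).toNat = N - 1 := by omega
  rw [hM, List.map_map]
  have hsum : ∀ f : Nat → Int, ((List.range (N - 1)).map f).sum = ∑ i ∈ Finset.range (N - 1), f i :=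
    fun f => rfl
  rw [hsum]
  have hptw : ∀ i ∈ Finset.range (N - 1),
      ((fun p => if PySem.Set.contains (sieve (3 * K)) p = false then
          p * (legendre (3 * K) p + 6 * legendre K p) else 0) ∘ fun k : Nat => 2 + (k : Int)) i
        = (fun q : Nat => if q.Prime then
            (q : Int) * (((Nat.factorial N).factorization q : Int)
              + 6 * ((Nat.factorial Kn).factorization q : Int)) else 0) (2 + i) := by
    intro i hi
    simp only [Finset.mem_range] at hi
    have hp : (2 + (i : Int)) = ((2 + i : Nat) : Int) := by push_cast; ring
    have h2 : 2 ≤ (2 + (i : Int)) := by omega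
    have hle : (2 + (i : Int)) ≤ 3 * K := by omega
    have hcond : (PySem.Set.contains (sieve (3 * K)) (2 + (i : Int)) = false)
        ↔ (2 + i : Nat).Prime := by
      rw [← Bool.not_eq_true, PySem.Set.contains_iff, sieve_prime (3 * K) _ h2 hle, not_not]
      have : (2 + (i : Int)).toNat = 2 + i := by omega
      rw [this]
    simp only [Function.comp_apply]
    split_ifs with hc hq hq
    · rw [hp, h3K, ← hKn, legendre_eq N (2 + i) hq, legendre_eq Kn (2 + i) hq]
    · exact absurd (hcond.mp hc) hq
    · exact absurd (hcond.mpr hq) hc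
    · rfl
  rw [Finset.sum_congr rfl hptw]
  have hIco : ∑ i ∈ Finset.range (N - 1),
      (fun q : Nat => if q.Prime then
          (q : Int) * (((Nat.factorial N).factorization q : Int)
            + 6 * ((Nat.factorial Kn).factorization q : Int)) else 0) (2 + i)
      = ∑ q ∈ Finset.Ico 2 (N + 1), (if q.Prime then
          (q : Int) * (((Nat.factorial N).factorization q : Int)
            + 6 * ((Nat.factorial Kn).factorization q : Int)) else 0) := by
    rw [Finset.sum_Ico_eq_sum_range]
    have : N + 1 - 2 = N - 1 := by omega
    rw [this]
  rw [hIco]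
  have hsplit : ∀ q : Nat, (if q.Prime then
        (q : Int) * (((Nat.factorial N).factorization q : Int)
          + 6 * ((Nat.factorial Kn).factorization q : Int)) else 0)
      = (if q.Prime then (q : Int) * ((Nat.factorial N).factorization q : Int) else 0)
        + 6 * (if q.Prime then (q : Int) * ((Nat.factorial Kn).factorization q : Int) else 0) := by
    intro q
    split_ifs with hq
    · ring
    · ring
  simp only [hsplit]
  rw [Finset.sum_add_distrib, ← Finset.mul_sum]
  rw [cast_sum_ite_prime N (Nat.factorial N) ?_, cast_sum_ite_prime N (Nat.factorial Kn) ?_]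
  · ring
  · intro p hp hd
    have := (Nat.Prime.dvd_factorial hp).mp hd
    exact ⟨hp.two_le, by omega⟩
  · intro p hp hd
    have := (Nat.Prime.dvd_factorial hp).mp hd
    exact ⟨hp.two_le, by omega⟩

theorem aRange_sum (n : Int) (hn : 0 ≤ n) :
    ((PySem.List.pyRange 2 (n + 1)).map sopfr).sum = (sopfrN (Nat.factorial n.toNat) : Int) := by
  set M := n.toNat with hMdef
  have hMn : ((M : Int)) = n := Int.toNat_of_nonneg hn
  rw [PySem.List.pyRange_one 2 (n + 1)]
  have hM : (n + 1 - 2).toNat = M - 1 := by omega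
  rw [hM, List.map_map]
  have hsum : ∀ f : Nat → Int, ((List.range (M - 1)).map f).sum = ∑ i ∈ Finset.range (M - 1), f i :=
    fun f => rfl
  rw [hsum]
  have hptw : ∀ i ∈ Finset.range (M - 1),
      (sopfr ∘ fun k : Nat => 2 + (k : Int)) i = (fun q : Nat => (sopfrN q : Int)) (2 + i) := by
    intro i _
    have hp : (2 + (i : Int)) = ((2 + i : Nat) : Int) := by push_cast; ring
    simp only [Function.comp_apply]
    rw [hp, sopfr_eq]
  rw [Finset.sum_congr rfl hptw]
  have hIco : ∑ i ∈ Finset.range (M - 1), (fun q : Nat => (sopfrN q : Int)) (2 + i)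
      = ∑ q ∈ Finset.Ico 2 (M + 1), (sopfrN q : Int) := by
    rw [Finset.sum_Ico_eq_sum_range]
    have : M + 1 - 2 = M - 1 := by omega
    rw [this]
  rw [hIco, ← Nat.cast_sum, sum_Ico_sopfrN]

theorem aMain_eq_bMain (K : Int) : aMain K = bMain K := by
  rw [aMain, bMain]
  congr 1
  have hsk : (PySem.List.pyRange 0 (K + 1)).foldl
      (fun s k => s + ((K.toNat.choose k.toNat : Int)) ^ 3) 0
      = (if 0 ≤ K then
          ((PySem.List.pyRange 0 (K + 1)).foldl
            (fun (p : Int × Int) k => (p.1 + p.2 ^ 3, PySem.Int.floordiv (p.2 * (K - k)) (k + 1)))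
            (0, 1)).1
        else 0) := by
    rcases (by omega : 0 ≤ K ∨ K < 0) with h | h
    · rw [if_pos h]; exact franel_eq K h
    · rw [if_neg (by omega), PySem.List.pyRange_one_eq_nil (by omega : K + 1 ≤ 0)]
      simp
  rw [← hsk]
  have hAfold := PySem.List.foldl_add
    ((addFactorialFactors K 6
        (addFactors ((PySem.List.pyRange 0 (K + 1)).foldl
            (fun s k => s + ((K.toNat.choose k.toNat : Int)) ^ 3) 0) 1
          (addFactorialFactors (3 * K) 1 PySem.Dict.empty))).items)
    (fun p : Int × Int => p.1 * p.2) 0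
  rw [hAfold]
  rw [show ∀ l : List (Int × Int), (l.map (fun p : Int × Int => p.1 * p.2)).sum = sumPE l
      from fun _ => rfl]
  rw [A_sum]
  have hfold : ((PySem.List.pyRange 2 (3 * K + 1)).map sopfr).sum
      + 6 * ((PySem.List.pyRange 2 (K + 1)).map sopfr).sum
      = (PySem.List.pyRange 2 (3 * K + 1)).foldl
          (fun t p =>
            if PySem.Set.contains (sieve (3 * K)) p = false then
              t + p * (legendre (3 * K) p + 6 * legendre K p)
            else t) 0 := by
    rcases (by omega : K ≤ 0 ∨ 1 ≤ K) with hK | hK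
    · rw [PySem.List.pyRange_one_eq_nil (by omega : 3 * K + 1 ≤ 2),
        PySem.List.pyRange_one_eq_nil (by omega : K + 1 ≤ 2)]
      simp
    · rw [aRange_sum (3 * K) (by omega), aRange_sum K (by omega), bFold_eq K hK]
      have h3 : (3 * K).toNat = 3 * K.toNat := by omega
      rw [h3]
  rw [← hfold]
  ring

-- ===== VERDICT (by name: the statement is the Claim_ definition above) =====
theorem execute_spec : Claim_equal_execute := by
  intro seed _ _
  unfold Spec_execute execute execute_alt
  exact aMain_eq_bMain _
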